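-- pv_equiv track=rewrite | github.com/theMPatel/functional_genomics_tools | ce/bin/opensrc_algos/genotyping/ecoli_pathotypefinder.py | get_pathotypes
-- ===== SOURCE A (Python) =====
-- def get_pathotypes(loci):
--
--     if any(locus.startswith('ipaH') for locus in loci) or 'ipaD' in loci:
--         return ['EIEC/Shigella']
--
--     if any(locus.startswith('stx') for locus in loci) and \
--         ('aaiC' in loci or 'aggR' in loci or 'aatA' in loci or 'aap' in loci):
--         return ['STEC/EAEC']
--
--     if any(locus.startswith('stx') for locus in loci):
--         return ['STEC']
--
--     if 'ltcA' in loci or 'sta1' in loci or 'stb' in loci: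
--         return ['ETEC']
--
--     if 'eae' in loci:
--         if ('bfpA' in loci or 'eaf' in loci):
--             return ['EPEC (typical)']
--         else:
--             return ['EPEC']
--
--     if 'aaiC' in loci or 'aggR' in loci or 'aatA' in loci or 'aap' in loci:
--         return ['EAEC']
--
--     if 'daaC' in loci:
--         return ['DAEC']
--
--     return []
-- ===== SOURCE B (Python) =====
-- def get_pathotypes(loci):
--     # One pass over loci computing all marker flags, then a flat decision table.
--     ipa = stx = eaec = etec = eae = typ = daa = False
--     for locus in loci:
--         ipa = ipa or locus.startswith('ipaH') or locus == 'ipaD'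
--         stx = stx or locus.startswith('stx')
--         eaec = eaec or locus in ('aaiC', 'aggR', 'aatA', 'aap')
--         etec = etec or locus in ('ltcA', 'sta1', 'stb')
--         eae = eae or locus == 'eae'
--         typ = typ or locus in ('bfpA', 'eaf')
--         daa = daa or locus == 'daaC'
--     table = [
--         (ipa, ['EIEC/Shigella']),
--         (stx and eaec, ['STEC/EAEC']),
--         (stx, ['STEC']),
--         (etec, ['ETEC']),
--         (eae and typ, ['EPEC (typical)']),
--         (eae, ['EPEC']),
--         (eaec, ['EAEC']),
--         (daa, ['DAEC']),
--     ]
--     for cond, result in table: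
--         if cond:
--             return result
--     return []
-- ===== Notes on version B (the rewrite author's own statement) =====
-- stated objective: alternative
-- what changed: Replaces the flat if-cascade that rescans loci per rule with one pass accumulating boolean marker flags, followed by a first-match scan over an ordered (condition, result) rule table.
import Mathlib
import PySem

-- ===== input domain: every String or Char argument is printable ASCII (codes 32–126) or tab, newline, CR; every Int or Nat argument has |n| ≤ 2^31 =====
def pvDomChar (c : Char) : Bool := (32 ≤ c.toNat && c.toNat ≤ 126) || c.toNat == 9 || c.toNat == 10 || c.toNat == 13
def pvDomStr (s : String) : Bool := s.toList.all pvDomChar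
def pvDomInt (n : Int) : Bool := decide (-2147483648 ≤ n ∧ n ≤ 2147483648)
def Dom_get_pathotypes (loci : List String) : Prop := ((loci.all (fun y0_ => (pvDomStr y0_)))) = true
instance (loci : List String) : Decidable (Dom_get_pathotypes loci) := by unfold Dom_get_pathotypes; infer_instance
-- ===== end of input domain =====

-- B replaces A's flat if-cascade (which rescans loci per rule) with one accumulating pass
-- computing marker flags plus a first-match scan over an ordered rule table (alternative decomposition).

-- ===== PORT A =====
def get_pathotypes (loci : List String) : List String :=
  if loci.any (fun locus => PySem.Str.startswith locus "ipaH") || loci.contains "ipaD" then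
    ["EIEC/Shigella"]
  else if loci.any (fun locus => PySem.Str.startswith locus "stx") &&
      (loci.contains "aaiC" || loci.contains "aggR" || loci.contains "aatA" || loci.contains "aap") then
    ["STEC/EAEC"]
  else if loci.any (fun locus => PySem.Str.startswith locus "stx") then
    ["STEC"]
  else if loci.contains "ltcA" || loci.contains "sta1" || loci.contains "stb" then
    ["ETEC"]
  else if loci.contains "eae" then
    (if loci.contains "bfpA" || loci.contains "eaf" then ["EPEC (typical)"] else ["EPEC"])
  else if loci.contains "aaiC" || loci.contains "aggR" || loci.contains "aatA" || loci.contains "aap" then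
    ["EAEC"]
  else if loci.contains "daaC" then
    ["DAEC"]
  else []

-- ===== PORT B =====
-- flag state: (ipa, stx, eaec, etec, eae, typ, daa)
def pvFlagStep (acc : Bool × Bool × Bool × Bool × Bool × Bool × Bool) (locus : String) :
    Bool × Bool × Bool × Bool × Bool × Bool × Bool :=
  match acc with
  | (ipa, stx, eaec, etec, eae, typ, daa) =>
    (ipa || PySem.Str.startswith locus "ipaH" || locus == "ipaD",
     stx || PySem.Str.startswith locus "stx",
     eaec || locus == "aaiC" || locus == "aggR" || locus == "aatA" || locus == "aap",
     etec || locus == "ltcA" || locus == "sta1" || locus == "stb",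
     eae || locus == "eae",
     typ || locus == "bfpA" || locus == "eaf",
     daa || locus == "daaC")

def get_pathotypes_alt (loci : List String) : List String :=
  match loci.foldl pvFlagStep (false, false, false, false, false, false, false) with
  | (ipa, stx, eaec, etec, eae, typ, daa) =>
    let table : List (Bool × List String) :=
      [(ipa, ["EIEC/Shigella"]),
       (stx && eaec, ["STEC/EAEC"]),
       (stx, ["STEC"]),
       (etec, ["ETEC"]),
       (eae && typ, ["EPEC (typical)"]),
       (eae, ["EPEC"]),
       (eaec, ["EAEC"]),
       (daa, ["DAEC"])]
    match table.find? (fun p => p.1) with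
    | some p => p.2
    | none => []

-- ===== PRECONDITION & SPEC =====
def Spec_get_pathotypes (loci : List String) (out : List String) : Prop := out = get_pathotypes_alt loci
instance (loci : List String) (out : List String) : Decidable (Spec_get_pathotypes loci out) := by unfold Spec_get_pathotypes; infer_instance

-- ===== CLAIM (what is proved, stated in full; the proofs are below) =====
def Claim_equal_get_pathotypes : Prop := ∀ (loci : List String), Dom_get_pathotypes loci → Spec_get_pathotypes loci (get_pathotypes loci)

-- ===== LEMMAS AND PROOFS =====

/-- `any` distributes over a disjunctive predicate (no library lemma of this shape was found). -/
lemma pvAny_or {α : Type} (l : List α) (p q : α → Bool) :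
    l.any (fun x => p x || q x) = (l.any p || l.any q) := by
  induction l with
  | nil => simp
  | cons h t ih => simp [ih, Bool.or_assoc, Bool.or_left_comm]

/-- The fold computes exactly the seven `any`-flags. -/
lemma pvFold_eq (loci : List String)
    (ipa stx eaec etec eae typ daa : Bool) :
    loci.foldl pvFlagStep (ipa, stx, eaec, etec, eae, typ, daa) =
      (ipa || loci.any (fun x => PySem.Str.startswith x "ipaH" || x == "ipaD"),
       stx || loci.any (fun x => PySem.Str.startswith x "stx"),
       eaec || loci.any (fun x => x == "aaiC" || x == "aggR" || x == "aatA" || x == "aap"),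
       etec || loci.any (fun x => x == "ltcA" || x == "sta1" || x == "stb"),
       eae || loci.any (fun x => x == "eae"),
       typ || loci.any (fun x => x == "bfpA" || x == "eaf"),
       daa || loci.any (fun x => x == "daaC")) := by
  induction loci generalizing ipa stx eaec etec eae typ daa with
  | nil => simp
  | cons h t ih =>
    simp only [List.foldl_cons, List.any_cons, pvFlagStep, ih]
    simp [Bool.or_assoc]

-- ===== VERDICT (by name: the statement is the Claim_ definition above) =====
theorem get_pathotypes_spec : Claim_equal_get_pathotypes := by
  intro loci _
  unfold Spec_get_pathotypes get_pathotypes get_pathotypes_alt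
  rw [pvFold_eq]
  simp only [Bool.false_or, pvAny_or, List.any_beq']
  generalize loci.any (fun x => PySem.Str.startswith x "ipaH") = a1
  generalize loci.any (fun x => PySem.Str.startswith x "stx") = a2
  generalize loci.contains "ipaD" = c1
  generalize loci.contains "aaiC" = c2
  generalize loci.contains "aggR" = c3
  generalize loci.contains "aatA" = c4
  generalize loci.contains "aap" = c5
  generalize loci.contains "ltcA" = c6
  generalize loci.contains "sta1" = c7
  generalize loci.contains "stb" = c8
  generalize loci.contains "eae" = c9
  generalize loci.contains "bfpA" = c10
  generalize loci.contains "eaf" = c11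
  generalize loci.contains "daaC" = c12
  revert a1 a2 c1 c2 c3 c4 c5 c6 c7 c8 c9 c10 c11 c12
  decide
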